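-- pv_equiv track=rewrite | github.com/CannonJunior/kiosk-controlled-speech | selenium_automation/simulation/optix_portal_simulator.py | _calculate_page_complexity
-- ===== SOURCE A (Python) =====
-- from typing import Dict, List, Any
--
-- def _calculate_page_complexity(elements: List[Dict]) -> str:
--     """Calculate automation complexity based on element types"""
--     complexity_score = 0
--
--     for element in elements:
--         interaction_type = element.get('interaction_type', '')
--         if interaction_type in ['input_text', 'click']:
--             complexity_score += 1
--         elif interaction_type in ['select_option', 'form_interaction']:
--             complexity_score += 2
--         elif interaction_type in ['complex_form', 'bulk_operations']:
--             complexity_score += 3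
--         elif interaction_type in ['file_upload', 'visualization_config']:
--             complexity_score += 4
--
--     if complexity_score <= 5:
--         return 'low'
--     elif complexity_score <= 15:
--         return 'medium'
--     else:
--         return 'high'
-- ===== SOURCE B (Python) =====
-- from typing import Dict, List, Any
--
-- _WEIGHTS = {
--     'input_text': 1, 'click': 1,
--     'select_option': 2, 'form_interaction': 2,
--     'complex_form': 3, 'bulk_operations': 3,
--     'file_upload': 4, 'visualization_config': 4,
-- }
--
-- def _calculate_page_complexity(elements: List[Dict]) -> str:
--     """Tally interaction-type frequencies, then apply the weights table."""
--     counts = {}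
--     for element in elements:
--         t = element.get('interaction_type', '')
--         counts[t] = counts.get(t, 0) + 1
--     score = sum(counts.get(t, 0) * w for t, w in _WEIGHTS.items())
--     return 'low' if score <= 5 else 'medium' if score <= 15 else 'high'
-- ===== Notes on version B (the rewrite author's own statement) =====
-- stated objective: alternative
-- what changed: Replaced the inline elif-chain scoring loop with a tally-then-weight decomposition: one pass builds a frequency dict of interaction types, then the score is a weighted sum over a separate weights table.
import Mathlib
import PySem

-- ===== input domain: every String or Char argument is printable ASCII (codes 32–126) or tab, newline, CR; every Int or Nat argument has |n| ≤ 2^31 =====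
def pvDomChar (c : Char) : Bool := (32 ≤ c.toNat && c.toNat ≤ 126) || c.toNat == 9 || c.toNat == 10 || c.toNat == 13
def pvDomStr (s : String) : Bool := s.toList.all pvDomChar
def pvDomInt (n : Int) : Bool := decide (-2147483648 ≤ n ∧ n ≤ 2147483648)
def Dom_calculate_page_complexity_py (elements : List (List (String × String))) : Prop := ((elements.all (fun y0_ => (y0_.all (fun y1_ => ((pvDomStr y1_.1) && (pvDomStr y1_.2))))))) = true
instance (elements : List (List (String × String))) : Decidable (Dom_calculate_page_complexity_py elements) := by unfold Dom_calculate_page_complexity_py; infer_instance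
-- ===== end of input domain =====

-- B changes the decomposition (tally interaction types first, then apply a weights table); same cost.
-- ===== PORT A =====
def calculate_page_complexity_py (elements : List (List (String × String))) : String :=
  let complexity_score : Int := elements.foldl (fun score element =>
    let interaction_type := (PySem.Dict.mk element).getD "interaction_type" ""
    if interaction_type ∈ (["input_text", "click"] : List String) then score + 1
    else if interaction_type ∈ (["select_option", "form_interaction"] : List String) then score + 2
    else if interaction_type ∈ (["complex_form", "bulk_operations"] : List String) then score + 3
    else if interaction_type ∈ (["file_upload", "visualization_config"] : List String) then score + 4
    else score) 0
  if complexity_score ≤ 5 then "low"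
  else if complexity_score ≤ 15 then "medium"
  else "high"

-- ===== PORT B =====
def pvWeights : List (String × Int) :=
  [("input_text", 1), ("click", 1), ("select_option", 2), ("form_interaction", 2),
   ("complex_form", 3), ("bulk_operations", 3), ("file_upload", 4), ("visualization_config", 4)]

def calculate_page_complexity_py_alt (elements : List (List (String × String))) : String :=
  let counts : PySem.Dict String Int := elements.foldl (fun d element =>
    let t := (PySem.Dict.mk element).getD "interaction_type" ""
    d.insert t (d.getD t 0 + 1)) PySem.Dict.empty
  let score : Int := (pvWeights.map (fun tw => counts.getD tw.1 0 * tw.2)).sum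
  if score ≤ 5 then "low" else if score ≤ 15 then "medium" else "high"

-- ===== PRECONDITION & SPEC =====
def Spec_calculate_page_complexity_py (elements : List (List (String × String))) (out : String) : Prop := out = calculate_page_complexity_py_alt elements
instance (elements : List (List (String × String))) (out : String) : Decidable (Spec_calculate_page_complexity_py elements out) := by unfold Spec_calculate_page_complexity_py; infer_instance

-- ===== CLAIM (what is proved, stated in full; the proofs are below) =====
def Claim_equal_calculate_page_complexity_py : Prop := ∀ (elements : List (List (String × String))), Dom_calculate_page_complexity_py elements → Spec_calculate_page_complexity_py elements (calculate_page_complexity_py elements)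

-- ===== LEMMAS AND PROOFS =====
-- weight of one interaction type (A's elif chain as a function)
def pvW (t : String) : Int :=
  if t ∈ (["input_text", "click"] : List String) then 1
  else if t ∈ (["select_option", "form_interaction"] : List String) then 2
  else if t ∈ (["complex_form", "bulk_operations"] : List String) then 3
  else if t ∈ (["file_upload", "visualization_config"] : List String) then 4
  else 0

def pvTy (element : List (String × String)) : String :=
  (PySem.Dict.mk element).getD "interaction_type" ""

theorem pvW_sum (x : String) :
    (pvWeights.map (fun tw => (if tw.1 = x then (1 : Int) else 0) * tw.2)).sum = pvW x := by
  by_cases h1 : x = "input_text"; · subst h1; decide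
  by_cases h2 : x = "click"; · subst h2; decide
  by_cases h3 : x = "select_option"; · subst h3; decide
  by_cases h4 : x = "form_interaction"; · subst h4; decide
  by_cases h5 : x = "complex_form"; · subst h5; decide
  by_cases h6 : x = "bulk_operations"; · subst h6; decide
  by_cases h7 : x = "file_upload"; · subst h7; decide
  by_cases h8 : x = "visualization_config"; · subst h8; decide
  simp [pvWeights, pvW, h1, h2, h3, h4, h5, h6, h7, h8, eq_comm]

theorem pv_main (ts : List String) :
    (ts.map pvW).sum =
      (pvWeights.map (fun tw => ((ts.count tw.1 : Int)) * tw.2)).sum := by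
  induction ts with
  | nil => simp [pvWeights]
  | cons x ts ih =>
    simp only [List.map_cons, List.sum_cons, ih, List.count_cons]
    rw [← pvW_sum x, ← List.sum_map_add]
    congr 1
    apply List.map_congr_left
    intro tw _
    push_cast
    by_cases h : tw.1 = x
    · simp [h]; ring
    · have h' : ¬ x = tw.1 := fun he => h he.symm
      simp [h, h', beq_iff_eq]

theorem calculate_page_complexity_py_spec : Claim_equal_calculate_page_complexity_py := by
  intro elements _
  unfold Spec_calculate_page_complexity_py calculate_page_complexity_py calculate_page_complexity_py_alt
  have hstep : (fun (score : Int) (element : List (String × String)) =>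
      let interaction_type := (PySem.Dict.mk element).getD "interaction_type" ""
      if interaction_type ∈ (["input_text", "click"] : List String) then score + 1
      else if interaction_type ∈ (["select_option", "form_interaction"] : List String) then score + 2
      else if interaction_type ∈ (["complex_form", "bulk_operations"] : List String) then score + 3
      else if interaction_type ∈ (["file_upload", "visualization_config"] : List String) then score + 4
      else score)
      = fun score element => score + pvW (pvTy element) := by
    funext score element
    simp only [pvW, pvTy]
    split_ifs <;> ring
  have hA : elements.foldl (fun (score : Int) element =>
      let interaction_type := (PySem.Dict.mk element).getD "interaction_type" ""
      if interaction_type ∈ (["input_text", "click"] : List String) then score + 1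
      else if interaction_type ∈ (["select_option", "form_interaction"] : List String) then score + 2
      else if interaction_type ∈ (["complex_form", "bulk_operations"] : List String) then score + 3
      else if interaction_type ∈ (["file_upload", "visualization_config"] : List String) then score + 4
      else score) 0
      = ((elements.map pvTy).map pvW).sum := by
    rw [hstep, PySem.List.foldl_add (g := fun element => pvW (pvTy element))]
    simp [List.map_map, Function.comp_def]
  have hB : ∀ t : String,
      (elements.foldl (fun d element =>
        let s := (PySem.Dict.mk element).getD "interaction_type" ""
        d.insert s (d.getD s 0 + 1)) PySem.Dict.empty).getD t 0
      = (((elements.map pvTy).count t : Int)) := by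
    intro t
    have hfold : (List.foldl (fun (d : PySem.Dict String Int) element =>
        let s := (PySem.Dict.mk element).getD "interaction_type" ""
        d.insert s (d.getD s 0 + 1)) PySem.Dict.empty elements)
        = List.foldl (fun (d : PySem.Dict String Int) s => d.insert s (d.getD s 0 + 1))
            PySem.Dict.empty (elements.map pvTy) := (List.foldl_map (f := pvTy) (g := fun (d : PySem.Dict String Int) s => d.insert s (d.getD s 0 + 1))).symm
    rw [hfold, PySem.Dict.getD_foldl_insert_add_one]
    simp
  simp only [hA, hB, pv_main]
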